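-- pv_equiv track=rewrite | github.com/davidheineman/ai2-meals | analysis/meat_transition_matrix.py | _square_matrix
-- ===== SOURCE A (Python) =====
-- from collections import Counter, defaultdict
--
-- def _square_matrix(labels: list[str], counts: Counter[tuple[str, str]]) -> list[list[int]]:
--     idx = {lb: i for i, lb in enumerate(labels)}
--     n = len(labels)
--     mat = [[0 for _ in range(n)] for _ in range(n)]
--     for (a, b), c in counts.items():
--         if a in idx and b in idx:
--             mat[idx[a]][idx[b]] += c
--     return mat
-- ===== SOURCE B (Python) =====
-- from collections import Counter
--
-- def _square_matrix(labels: list[str], counts: Counter[tuple[str, str]]) -> list[list[int]]: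
--     # Gather: enumerate the dense label grid and read each cell from counts.
--     return [[counts.get((a, b), 0) for b in labels] for a in labels]
-- ===== Notes on version B (the rewrite author's own statement) =====
-- stated objective: idiomatic
-- what changed: B builds the matrix as a gather (a nested comprehension over the label grid querying the Counter per cell) instead of A's scatter (allocating a zero matrix, building a label->index map and writing each count into indexed cells).
-- outside the precondition, e.g. on _square_matrix(['x', 'x'], {('x', 'x'): 1}): A returns [[0, 0], [0, 1]], B returns [[1, 1], [1, 1]]
import Mathlib
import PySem

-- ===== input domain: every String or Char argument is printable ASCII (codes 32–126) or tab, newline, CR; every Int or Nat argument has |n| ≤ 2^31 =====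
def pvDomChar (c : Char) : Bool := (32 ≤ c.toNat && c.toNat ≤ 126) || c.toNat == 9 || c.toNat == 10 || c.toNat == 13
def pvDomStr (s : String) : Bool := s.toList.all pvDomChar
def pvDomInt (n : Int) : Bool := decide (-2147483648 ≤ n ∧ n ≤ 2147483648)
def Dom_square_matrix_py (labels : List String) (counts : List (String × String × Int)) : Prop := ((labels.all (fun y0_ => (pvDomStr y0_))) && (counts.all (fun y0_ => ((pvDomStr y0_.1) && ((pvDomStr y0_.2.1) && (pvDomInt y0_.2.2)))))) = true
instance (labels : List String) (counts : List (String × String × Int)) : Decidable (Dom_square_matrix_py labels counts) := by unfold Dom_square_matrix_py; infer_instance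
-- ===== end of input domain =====

-- B replaces A's scatter (zero matrix + label->index dict + indexed writes) by a gather:
-- a nested comprehension over the label grid reading each cell from the counts dict.

-- ===== PORT A =====
-- idx = {lb: i for i, lb in enumerate(labels)}
def pvBuildIdx (labels : List String) : PySem.Dict String Nat :=
  (PySem.List.enumerate labels).foldl (fun d p => d.insert p.2 p.1.toNat) PySem.Dict.empty

-- for (a, b), c in counts.items(): if a in idx and b in idx: mat[idx[a]][idx[b]] += c
def pvStep (idx : PySem.Dict String Nat) (m : List (List Int)) (e : String × String × Int) :
    List (List Int) :=
  if idx.contains e.1 && idx.contains e.2.1 then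
    match idx.get? e.1, idx.get? e.2.1 with
    | some i, some j => m.modify i (fun row => row.modify j (· + e.2.2))
    | _, _ => m
  else m

def square_matrix_py (labels : List String) (counts : List (String × String × Int)) : List (List Int) :=
  let idx := pvBuildIdx labels
  let n := labels.length
  let mat := List.replicate n (List.replicate n (0 : Int))
  counts.foldl (pvStep idx) mat

-- ===== PORT B =====
-- counts.get((a, b), 0): first match in the association list encoding the Counter
def pvGet0 (counts : List (String × String × Int)) (a b : String) : Int :=
  ((counts.find? (fun p => p.1 == a && p.2.1 == b)).map (fun p => p.2.2)).getD 0

def square_matrix_py_alt (labels : List String) (counts : List (String × String × Int)) : List (List Int) :=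
  labels.map (fun a => labels.map (fun b => pvGet0 counts a b))

-- ===== PRECONDITION & SPEC =====
-- Pre_ excludes (a) lists with duplicate (a, b) keys whose components both lie in labels: such a
-- list does not encode any Python Counter (dict keys are unique), A's loop would sum duplicates
-- while B's first-match lookup would not; and (b) inputs where some count with a nonzero value
-- has both components in labels and touches a label occurring more than once in labels: there
-- A scatters only into the last occurrence's row/column (last-wins idx overwrite) while B fills
-- every occurrence, and both are defensible readings of a matrix over duplicated labels.
def Pre_square_matrix_py (labels : List String) (counts : List (String × String × Int)) : Prop :=
  ((counts.filter (fun p => decide (p.1 ∈ labels) && decide (p.2.1 ∈ labels))).map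
    (fun p => (p.1, p.2.1))).Nodup ∧
  ∀ p ∈ counts, p.1 ∈ labels → p.2.1 ∈ labels → p.2.2 ≠ 0 →
    labels.count p.1 ≤ 1 ∧ labels.count p.2.1 ≤ 1
instance (labels : List String) (counts : List (String × String × Int)) : Decidable (Pre_square_matrix_py labels counts) := by unfold Pre_square_matrix_py; infer_instance

def pvWitness_square_matrix_py : List String × (List (String × String × Int)) :=
  (["a", "b"], [("a", "b", 2), ("b", "b", 1), ("c", "a", 5)])

def Spec_square_matrix_py (labels : List String) (counts : List (String × String × Int)) (out : List (List Int)) : Prop := out = square_matrix_py_alt labels counts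
instance (labels : List String) (counts : List (String × String × Int)) (out : List (List Int)) : Decidable (Spec_square_matrix_py labels counts out) := by unfold Spec_square_matrix_py; infer_instance

-- ===== CLAIM (what is proved, stated in full; the proofs are below) =====
def Claim_equal_square_matrix_py : Prop := ∀ (labels : List String) (counts : List (String × String × Int)), Dom_square_matrix_py labels counts → Pre_square_matrix_py labels counts → Spec_square_matrix_py labels counts (square_matrix_py labels counts)

-- ===== LEMMAS AND PROOFS =====

-- index of the LAST occurrence of x in ls (what A's last-wins dict comprehension stores)
def pvLast? (ls : List String) (x : String) : Option Nat :=
  match ls with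
  | [] => none
  | l :: ls =>
    match pvLast? ls x with
    | some k => some (k + 1)
    | none => if x = l then some 0 else none

theorem pvLast?_eq_none_iff (ls : List String) (x : String) :
    pvLast? ls x = none ↔ x ∉ ls := by
  induction ls with
  | nil => simp [pvLast?]
  | cons l ls ih =>
    simp only [pvLast?, List.mem_cons]
    cases h : pvLast? ls x with
    | some k =>
      have hx : x ∈ ls := by
        by_contra hx; rw [ih.mpr hx] at h; cases h
      simp [hx]
    | none =>
      have hx : x ∉ ls := ih.mp h
      by_cases hl : x = l <;> simp [hl, hx]

theorem pvLast?_getElem (ls : List String) (x : String) (k : Nat)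
    (h : pvLast? ls x = some k) : ∃ hk : k < ls.length, ls[k] = x := by
  induction ls generalizing k with
  | nil => cases h
  | cons l ls ih =>
    simp only [pvLast?] at h
    cases h' : pvLast? ls x with
    | some m =>
      rw [h'] at h
      obtain ⟨hm, he⟩ := ih m h'
      have hk : k = m + 1 := (Option.some_inj.mp h).symm
      subst hk
      exact ⟨by simpa using hm, by simpa using he⟩
    | none =>
      rw [h'] at h
      split_ifs at h with hxl
      · have hk : k = 0 := (Option.some_inj.mp h).symm
        subst hk
        exact ⟨by simp, hxl.symm⟩

theorem pvCount_unique (l : List String) (a : String) (h : l.count a ≤ 1) (i k : Nat)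
    (hi : i < l.length) (hk : k < l.length) (h1 : l[i] = a) (h2 : l[k] = a) : i = k := by
  by_contra hne
  have hd : l.Duplicate a := by
    rcases Nat.lt_or_ge i k with hlt | hge
    · exact List.duplicate_iff_exists_distinct_get.mpr ⟨⟨i, hi⟩, ⟨k, hk⟩, hlt, h1.symm, h2.symm⟩
    · have hlt : k < i := by omega
      exact List.duplicate_iff_exists_distinct_get.mpr ⟨⟨k, hk⟩, ⟨i, hi⟩, hlt, h2.symm, h1.symm⟩
  have := List.duplicate_iff_two_le_count.mp hd
  omega

theorem pvIdx_aux (ls : List String) (s : Nat) (d : PySem.Dict String Nat) (x : String) :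
    ((PySem.List.enumerate ls (s : Int)).foldl (fun d p => d.insert p.2 p.1.toNat) d).get? x
      = if x ∈ ls then (pvLast? ls x).map (fun k => s + k) else d.get? x := by
  induction ls generalizing s d with
  | nil => simp
  | cons l ls ih =>
    rw [PySem.List.enumerate_cons, List.foldl_cons]
    have hcast : ((s : Int) + 1) = ((s + 1 : Nat) : Int) := by push_cast; ring
    rw [hcast, ih (s+1)]
    by_cases hx : x ∈ ls
    · obtain ⟨k, hk⟩ := Option.ne_none_iff_exists'.mp
        (fun h => ((pvLast?_eq_none_iff ls x).mp h) hx)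
      have hck : pvLast? (l :: ls) x = some (k + 1) := by
        unfold pvLast?; rw [hk]
      rw [if_pos hx, if_pos (List.mem_cons_of_mem l hx), hk, hck]
      simp only [Option.map_some]
      congr 1
      omega
    · have hnone : pvLast? ls x = none := (pvLast?_eq_none_iff ls x).mpr hx
      rw [if_neg hx]
      by_cases hxl : x = l
      · subst hxl
        have hc0 : pvLast? (x :: ls) x = some 0 := by
          unfold pvLast?; rw [hnone]; simp
        rw [if_pos List.mem_cons_self, hc0, PySem.Dict.get?_insert]
        simp
      · have hmem : x ∉ l :: ls := by simp [hxl, hx]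
        rw [if_neg hmem, PySem.Dict.get?_insert]
        simp [hxl]

theorem pvIdx_get (labels : List String) (x : String) :
    (pvBuildIdx labels).get? x = pvLast? labels x := by
  have h0 : (0 : Int) = ((0 : Nat) : Int) := rfl
  unfold pvBuildIdx
  rw [h0, pvIdx_aux labels 0 _ x]
  by_cases hx : x ∈ labels
  · obtain ⟨k, hk⟩ := Option.ne_none_iff_exists'.mp
      (fun h => ((pvLast?_eq_none_iff labels x).mp h) hx)
    simp [hx, hk]
  · simp [hx, (pvLast?_eq_none_iff labels x).mpr hx]

theorem pvGet0_none (labels : List String) (rest : List (String × String × Int)) (a b : String)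
    (ha : a ∈ labels) (hb : b ∈ labels)
    (h : (a, b) ∉ (rest.filter
        (fun p => decide (p.1 ∈ labels) && decide (p.2.1 ∈ labels))).map
      (fun p => (p.1, p.2.1))) : pvGet0 rest a b = 0 := by
  unfold pvGet0
  have : rest.find? (fun p => p.1 == a && p.2.1 == b) = none := by
    rw [List.find?_eq_none]
    intro p hp hpeq
    simp only [beq_iff_eq, Bool.and_eq_true] at hpeq
    exact h (List.mem_map.mpr ⟨p, List.mem_filter.mpr ⟨hp, by simp [hpeq.1, hpeq.2, ha, hb]⟩,
      by simp [hpeq.1, hpeq.2]⟩)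
  rw [this]; rfl

theorem pvGet0_cons_self (rest : List (String × String × Int)) (a b : String) (c : Int) :
    pvGet0 ((a, b, c) :: rest) a b = c := by
  unfold pvGet0; simp

theorem pvGet0_cons_ne (rest : List (String × String × Int)) (a b a' b' : String) (c : Int)
    (h : a' ≠ a ∨ b' ≠ b) : pvGet0 ((a, b, c) :: rest) a' b' = pvGet0 rest a' b' := by
  unfold pvGet0
  rcases h with h | h <;> simp [Ne.symm h]

theorem pvCell_modify (mat : List (List Int)) (ia jb i j : Nat)
    (hi : i < mat.length) (hj : j < (mat[i]).length) (c : Int) :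
    (((mat.modify ia (fun row => row.modify jb (· + c)))[i]?.getD [])[j]?.getD 0)
      = ((mat[i]?.getD [])[j]?.getD 0) + (if i = ia ∧ j = jb then c else 0) := by
  have hi' : i < (mat.modify ia (fun row => row.modify jb (· + c))).length := by
    simpa [List.length_modify] using hi
  rw [List.getElem?_eq_getElem hi', List.getElem?_eq_getElem hi]
  simp only [Option.getD_some]
  rw [List.getElem_modify]
  by_cases h1 : ia = i
  · subst h1
    rw [if_pos rfl]
    have hj' : j < ((mat[ia]).modify jb (· + c)).length := by
      simpa [List.length_modify] using hj
    rw [List.getElem?_eq_getElem hj', List.getElem?_eq_getElem hj]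
    simp only [Option.getD_some]
    rw [List.getElem_modify]
    by_cases h2 : jb = j
    · subst h2
      simp
    · rw [if_neg h2, if_neg (fun h => h2 h.2.symm), add_zero]
  · rw [if_neg h1, if_neg (fun h => h1 h.1.symm), add_zero]

theorem pvStep_len (idx : PySem.Dict String Nat) (m : List (List Int))
    (e : String × String × Int) (k : Nat) :
    ((pvStep idx m e)[k]?.map List.length) = m[k]?.map List.length := by
  unfold pvStep
  split
  · split
    · rw [List.getElem?_modify]
      cases m[k]? <;> simp <;> split <;> simp [List.length_modify]
    · rfl
  · rfl

theorem pvFold_len (idx : PySem.Dict String Nat) (counts : List (String × String × Int))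
    (mat : List (List Int)) (k : Nat) :
    ((counts.foldl (pvStep idx) mat)[k]?.map List.length) = mat[k]?.map List.length := by
  induction counts generalizing mat with
  | nil => rfl
  | cons e rest ih => rw [List.foldl_cons, ih, pvStep_len]

theorem pvFold_length (idx : PySem.Dict String Nat) (counts : List (String × String × Int))
    (mat : List (List Int)) :
    (counts.foldl (pvStep idx) mat).length = mat.length := by
  induction counts generalizing mat with
  | nil => rfl
  | cons e rest ih =>
    rw [List.foldl_cons, ih]
    unfold pvStep
    split
    · split
      · simp [List.length_modify]
      · rfl
    · rfl

theorem pvFold_entry (labels : List String)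
    (counts : List (String × String × Int))
    (hk : ((counts.filter (fun p => decide (p.1 ∈ labels) && decide (p.2.1 ∈ labels))).map
      (fun p => (p.1, p.2.1))).Nodup)
    (hD : ∀ p ∈ counts, p.1 ∈ labels → p.2.1 ∈ labels → p.2.2 ≠ 0 →
      labels.count p.1 ≤ 1 ∧ labels.count p.2.1 ≤ 1)
    (mat : List (List Int)) (hlen : mat.length = labels.length)
    (hrow : ∀ k (h : k < mat.length), mat[k].length = labels.length)
    (i j : Nat) (hi : i < labels.length) (hj : j < labels.length) :
    (((counts.foldl (pvStep (pvBuildIdx labels)) mat)[i]?.getD [])[j]?.getD 0)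
      = ((mat[i]?.getD [])[j]?.getD 0) + pvGet0 counts labels[i] labels[j] := by
  induction counts generalizing mat with
  | nil => simp [pvGet0]
  | cons e rest ih =>
    obtain ⟨a, b, c⟩ := e
    rw [List.foldl_cons]
    have hidx := pvIdx_get labels
    have hD' : ∀ p ∈ rest, p.1 ∈ labels → p.2.1 ∈ labels → p.2.2 ≠ 0 →
        labels.count p.1 ≤ 1 ∧ labels.count p.2.1 ≤ 1 :=
      fun p hp => hD p (List.mem_cons_of_mem _ hp)
    have hIlt : i < mat.length := by omega
    have hJlt : j < (mat[i]).length := by rw [hrow i hIlt]; omega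
    by_cases ha : a ∈ labels
    · by_cases hb : b ∈ labels
      · have hfc : ((a, b, c) :: rest).filter
            (fun p => decide (p.1 ∈ labels) && decide (p.2.1 ∈ labels))
            = (a, b, c) :: rest.filter
              (fun p => decide (p.1 ∈ labels) && decide (p.2.1 ∈ labels)) := by
          rw [List.filter_cons, if_pos (by simp [ha, hb])]
        rw [hfc, List.map_cons] at hk
        obtain ⟨hknot, hk'⟩ := List.nodup_cons.mp hk
        obtain ⟨ia, hia⟩ := Option.ne_none_iff_exists'.mp
          (fun h => ((pvLast?_eq_none_iff labels a).mp h) ha)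
        obtain ⟨jb, hjb⟩ := Option.ne_none_iff_exists'.mp
          (fun h => ((pvLast?_eq_none_iff labels b).mp h) hb)
        have hstep : pvStep (pvBuildIdx labels) mat (a, b, c)
            = mat.modify ia (fun row => row.modify jb (· + c)) := by
          unfold pvStep
          simp [PySem.Dict.contains_eq_isSome_get?, hidx, hia, hjb]
        obtain ⟨hia_lt, hia_eq⟩ := pvLast?_getElem labels a ia hia
        obtain ⟨hjb_lt, hjb_eq⟩ := pvLast?_getElem labels b jb hjb
        rw [hstep, ih hk' hD' _ (by simp [List.length_modify, hlen])
          (by intro k hk2; rw [List.getElem_modify]; split <;>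
              simp [List.length_modify, hrow k (by simpa [List.length_modify] using hk2)]),
          pvCell_modify mat ia jb i j hIlt hJlt c]
        by_cases heq : labels[i] = a ∧ labels[j] = b
        · obtain ⟨h1, h2⟩ := heq
          rw [h1, h2, pvGet0_cons_self, pvGet0_none labels rest a b ha hb hknot]
          by_cases hc : c = 0
          · subst hc
            split <;> ring
          · obtain ⟨hca, hcb⟩ := hD (a, b, c) List.mem_cons_self ha hb hc
            have hieq : i = ia := pvCount_unique labels a hca i ia hi hia_lt h1 hia_eq
            have hjeq : j = jb := pvCount_unique labels b hcb j jb hj hjb_lt h2 hjb_eq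
            rw [if_pos ⟨hieq, hjeq⟩]
            ring
        · have hne : labels[i] ≠ a ∨ labels[j] ≠ b := by tauto
          rw [pvGet0_cons_ne rest a b _ _ c hne]
          have hnot : ¬(i = ia ∧ j = jb) := by
            rintro ⟨rfl, rfl⟩
            exact heq ⟨hia_eq, hjb_eq⟩
          rw [if_neg hnot, add_zero]
      · have hstep : pvStep (pvBuildIdx labels) mat (a, b, c) = mat := by
          unfold pvStep
          simp [PySem.Dict.contains_eq_isSome_get?, hidx,
            (pvLast?_eq_none_iff labels b).mpr hb]
        have hne : labels[j] ≠ b := fun h => hb (h ▸ labels.getElem_mem hj)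
        rw [List.filter_cons, if_neg (by simp [hb])] at hk
        rw [hstep, pvGet0_cons_ne rest a b _ _ c (Or.inr hne), ih hk hD' mat hlen hrow]
    · have hstep : pvStep (pvBuildIdx labels) mat (a, b, c) = mat := by
        unfold pvStep
        simp [PySem.Dict.contains_eq_isSome_get?, hidx,
          (pvLast?_eq_none_iff labels a).mpr ha]
      have hne : labels[i] ≠ a := fun h => ha (h ▸ labels.getElem_mem hi)
      rw [List.filter_cons, if_neg (by simp [ha])] at hk
      rw [hstep, pvGet0_cons_ne rest a b _ _ c (Or.inl hne), ih hk hD' mat hlen hrow]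

-- ===== VERDICT (by name: the statement is the Claim_ definition above) =====
theorem square_matrix_py_spec : Claim_equal_square_matrix_py := by
  intro labels counts _ hpre
  obtain ⟨hk, hD⟩ := hpre
  unfold Spec_square_matrix_py square_matrix_py square_matrix_py_alt
  have hflen : (counts.foldl (pvStep (pvBuildIdx labels))
      (List.replicate labels.length (List.replicate labels.length (0 : Int)))).length
      = labels.length := by
    rw [pvFold_length]; simp
  apply List.ext_getElem (by simpa using hflen)
  intro i h1 h2
  have hi : i < labels.length := by simpa using h2
  have hrlen : (counts.foldl (pvStep (pvBuildIdx labels))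
      (List.replicate labels.length (List.replicate labels.length (0 : Int))))[i].length
      = labels.length := by
    have := pvFold_len (pvBuildIdx labels) counts
      (List.replicate labels.length (List.replicate labels.length (0 : Int))) i
    rw [List.getElem?_eq_getElem h1, List.getElem?_eq_getElem (by simpa using hi)] at this
    simpa using this
  apply List.ext_getElem (by simpa using hrlen)
  intro j hj1 hj2
  have hj : j < labels.length := by rw [hrlen] at hj1; exact hj1
  have hentry := pvFold_entry labels counts hk hD
    (List.replicate labels.length (List.replicate labels.length (0 : Int)))
    (by simp) (by intro k hk2; simp) i j hi hj
  rw [List.getElem?_eq_getElem h1, Option.getD_some, List.getElem?_eq_getElem hj1,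
    Option.getD_some] at hentry
  have hz : ((List.replicate labels.length (List.replicate labels.length (0 : Int)))[i]?.getD
      [])[j]?.getD 0 = 0 := by
    simp [hi, hj]
  rw [hz, zero_add] at hentry
  rw [hentry]
  simp
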